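-- pv_equiv track=rewrite | github.com/valvido/University_projects | zadace/4.py | ubaci_crtice
-- ===== SOURCE A (Python) =====
-- def ubaci_crtice(n):
--
-- 	m = []
--
-- 	if(n[0] == 1): m.append('_')
--
--
-- 	for i in range(len(n) - 1):
-- 		m.append(str(n[i]))
-- 		if(n[i] == n[i+1]): m.append('_')
--
-- 	m.append(str(n[len(n)-1]))
-- 	if(n[len(n)-1] == 0): m.append('_')
--
-- 	return m
-- ===== SOURCE B (Python) =====
-- def _runs(n):
--     """Run-length encode n into (value, count) pairs, folding from the right:
--     iterate the reversed list, extending the most recent run if the value matches."""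
--     rev = []  # runs in reverse order
--     for v in reversed(n):
--         if rev and rev[-1][0] == v:
--             rev[-1] = (v, rev[-1][1] + 1)
--         else:
--             rev.append((v, 1))
--     rev.reverse()
--     return rev
--
--
-- def ubaci_crtice(n):
--     m = ['_'] if n[0] == 1 else []
--     for v, k in _runs(n):
--         m += [str(v), '_'] * k
--         m.pop()  # drop the trailing '_' of this run
--     if n[-1] == 0:
--         m.append('_')
--     return m
-- ===== Notes on version B (the rewrite author's own statement) =====
-- stated objective: alternative
-- what changed: B run-length encodes the list with a recursive helper and emits each run as value/underscore tokens, instead of A's index loop over adjacent pairs.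
import Mathlib
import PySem

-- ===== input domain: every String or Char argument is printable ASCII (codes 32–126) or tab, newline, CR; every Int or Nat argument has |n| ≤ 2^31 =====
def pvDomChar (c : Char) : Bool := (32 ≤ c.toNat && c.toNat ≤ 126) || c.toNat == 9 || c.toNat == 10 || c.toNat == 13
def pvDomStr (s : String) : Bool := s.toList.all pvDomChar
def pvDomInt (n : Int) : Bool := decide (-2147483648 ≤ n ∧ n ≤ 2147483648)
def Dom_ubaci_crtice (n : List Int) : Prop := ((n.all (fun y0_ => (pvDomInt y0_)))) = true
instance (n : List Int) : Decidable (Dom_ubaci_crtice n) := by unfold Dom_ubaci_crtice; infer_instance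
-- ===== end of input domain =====

-- B re-implements A by run-length encoding the list recursively and emitting each
-- run as value/underscore tokens ('alternative' objective, same cost); A and B both
-- raise IndexError on the empty list, which Pre_ excludes.

-- ===== PORT A =====
-- A's pair-scanning loop 'for i in range(len(n)-1): append str(n[i]); if n[i]==n[i+1] append "_"',
-- followed by the final 'append str(n[-1])', as the obvious structural recursion over the same pairs:
def ubaciBody : List Int → List String
  | [] => []
  | [x] => [PySem.Int.toStr x]
  | x :: y :: t =>
    PySem.Int.toStr x :: ((if x = y then ["_"] else []) ++ ubaciBody (y :: t))

def ubaci_crtice (n : List Int) : List String :=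
  match n with
  | [] => []  -- n[0] raises IndexError in Python; excluded by Pre_
  | x :: _ =>
    let m : List String := if x = 1 then ["_"] else []
    let m := m ++ ubaciBody n
    if PySem.List.pyGetD n ((n.length : Int) - 1) 0 = 0 then m ++ ["_"] else m

-- ===== PORT B =====
-- B's helper _runs folds the list from the right (loop over reversed(n) extending the
-- latest run, then reverse); ported as the corresponding structural right-recursion:
def pvRuns : List Int → List (Int × Int)
  | [] => []
  | x :: t =>
    match pvRuns t with
    | (v, k) :: r => if v = x then (x, k + 1) :: r else (x, 1) :: (v, k) :: r
    | [] => [(x, 1)]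

-- m += [str(v), '_'] * k
def pvChunk (v k : Int) : List String := (List.replicate k.toNat [PySem.Int.toStr v, "_"]).flatten

def ubaci_crtice_alt (n : List Int) : List String :=
  match n with
  | [] => []  -- n[0] raises IndexError in Python; excluded by Pre_
  | x :: _ =>
    let m : List String := if x = 1 then ["_"] else []
    let m := (pvRuns n).foldl (fun m vk => (m ++ pvChunk vk.1 vk.2).dropLast) m
    if PySem.List.pyGetD n (-1) 0 = 0 then m ++ ["_"] else m

-- ===== PRECONDITION & SPEC =====
-- Pre_ excludes the empty list, on which A (n[0]) raises IndexError.
def Pre_ubaci_crtice (n : List Int) : Prop := n ≠ []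
instance (n : List Int) : Decidable (Pre_ubaci_crtice n) := by unfold Pre_ubaci_crtice; infer_instance
def pvWitness_ubaci_crtice : List Int := ([1, 1, 0])

def Spec_ubaci_crtice (n : List Int) (out : List String) : Prop := out = ubaci_crtice_alt n
instance (n : List Int) (out : List String) : Decidable (Spec_ubaci_crtice n out) := by unfold Spec_ubaci_crtice; infer_instance

-- ===== CLAIM (what is proved, stated in full; the proofs are below) =====
def Claim_equal_ubaci_crtice : Prop := ∀ (n : List Int), Dom_ubaci_crtice n → Pre_ubaci_crtice n → Spec_ubaci_crtice n (ubaci_crtice n)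

-- ===== LEMMAS AND PROOFS =====

def pvEmit (vk : Int × Int) : List String := (pvChunk vk.1 vk.2).dropLast

lemma pvRuns_cons (x : Int) (t : List Int) :
    pvRuns (x :: t) = match pvRuns t with
      | (v, k) :: r => if v = x then (x, k + 1) :: r else (x, 1) :: (v, k) :: r
      | [] => [(x, 1)] := rfl

lemma dropLast_append' {a : Type} (xs ys : List a) (h : ys ≠ []) :
    (xs ++ ys).dropLast = xs ++ ys.dropLast := by
  obtain ⟨z, zs, rfl⟩ := List.exists_cons_of_ne_nil h
  induction xs with
  | nil => rfl
  | cons w ws ih => simp [List.dropLast_cons_of_ne_nil]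

lemma pvChunk_succ (v k : Int) (hk : 0 ≤ k) :
    pvChunk v (k + 1) = [PySem.Int.toStr v, "_"] ++ pvChunk v k := by
  unfold pvChunk
  rw [show (k + 1).toNat = k.toNat + 1 by omega, List.replicate_succ]
  rfl

lemma pvChunk_ne_nil (v k : Int) (hk : 1 ≤ k) : pvChunk v k ≠ [] := by
  unfold pvChunk
  rw [show k.toNat = (k - 1).toNat + 1 by omega, List.replicate_succ]
  simp

-- pvRuns (x :: t) starts with value x and a positive count, all counts positive
lemma pvRuns_head : ∀ (x : Int) (t : List Int),
    ∃ k r, pvRuns (x :: t) = (x, k) :: r ∧ 1 ≤ k ∧ (∀ p ∈ r, 1 ≤ p.2) := by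
  intro x t
  induction t generalizing x with
  | nil => exact ⟨1, [], rfl, by omega, by simp⟩
  | cons y t ih =>
    obtain ⟨k, r, hr, hk, hall⟩ := ih y
    by_cases hxy : y = x
    · refine ⟨k + 1, r, ?_, by omega, hall⟩
      rw [pvRuns_cons, hr]
      simp [hxy]
    · refine ⟨1, (y, k) :: r, ?_, le_refl _, ?_⟩
      · rw [pvRuns_cons, hr]
        simp [hxy]
      · intro p hp
        rcases List.mem_cons.mp hp with h | h
        · subst h; exact hk
        · exact hall p h

-- the foldl over runs is a flatMap as soon as every count is positive
lemma foldl_emit (rs : List (Int × Int)) (m0 : List String)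
    (h : ∀ p ∈ rs, 1 ≤ p.2) :
    rs.foldl (fun m vk => (m ++ pvChunk vk.1 vk.2).dropLast) m0
      = m0 ++ rs.flatMap pvEmit := by
  induction rs generalizing m0 with
  | nil => simp
  | cons p rs ih =>
    have hp : 1 ≤ p.2 := h p List.mem_cons_self
    have step : (m0 ++ pvChunk p.1 p.2).dropLast = m0 ++ pvEmit p :=
      dropLast_append' _ _ (pvChunk_ne_nil _ _ hp)
    simp only [List.foldl_cons, step, List.flatMap_cons]
    rw [ih _ (fun q hq => h q (List.mem_cons_of_mem _ hq)), List.append_assoc]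

-- A's body equals the flatMap of run emissions
lemma ubaciBody_eq : ∀ n : List Int, ubaciBody n = (pvRuns n).flatMap pvEmit := by
  intro n
  induction n with
  | nil => simp [ubaciBody, pvRuns]
  | cons x t ih =>
    cases t with
    | nil => simp [ubaciBody, pvRuns, pvEmit, pvChunk]
    | cons y s =>
      obtain ⟨k, r, hr, hk, _⟩ := pvRuns_head y s
      by_cases hxy : x = y
      · subst hxy
        have hruns : pvRuns (x :: x :: s) = (x, k + 1) :: r := by
          rw [pvRuns_cons, hr]; simp
        have hemit : pvEmit (x, k + 1) = PySem.Int.toStr x :: "_" :: pvEmit (x, k) := by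
          show (pvChunk x (k + 1)).dropLast = _
          rw [pvChunk_succ x k (by omega),
            dropLast_append' _ _ (pvChunk_ne_nil x k hk)]
          rfl
        rw [show ubaciBody (x :: x :: s)
              = PySem.Int.toStr x :: "_" :: ubaciBody (x :: s) from by simp [ubaciBody],
          ih, hruns, hr, List.flatMap_cons, List.flatMap_cons, hemit]
        rfl
      · have hyx : ¬ y = x := fun h => hxy h.symm
        have hruns : pvRuns (x :: y :: s) = (x, 1) :: (y, k) :: r := by
          rw [pvRuns_cons, hr]; simp [hyx]
        rw [show ubaciBody (x :: y :: s)
              = PySem.Int.toStr x :: ubaciBody (y :: s) from by simp [ubaciBody, hxy],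
          ih, hruns, List.flatMap_cons, hr, List.flatMap_cons]
        rfl

lemma last_eq (x : Int) (t : List Int) :
    PySem.List.pyGetD (x :: t) (((x :: t).length : Int) - 1) 0
      = PySem.List.pyGetD (x :: t) (-1) 0 := by
  rw [PySem.List.pyGetD_neg_ofNat (x :: t) 1 0 (by omega) (by simp)]
  rw [show ((x :: t).length : Int) - 1 = ((t.length : Nat) : Int) by simp]
  rw [PySem.List.pyGetD_natCast]
  simp
  rfl

-- ===== VERDICT (by name: the statement is the Claim_ definition above) =====
theorem ubaci_crtice_spec : Claim_equal_ubaci_crtice := by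
  intro n _ hpre
  unfold Spec_ubaci_crtice
  match n, hpre with
  | x :: t, _ =>
    obtain ⟨k, r, hr, hk, hall⟩ := pvRuns_head x t
    have hpos : ∀ p ∈ pvRuns (x :: t), 1 ≤ p.2 := by
      intro p hp
      rw [hr] at hp
      rcases List.mem_cons.mp hp with h | h
      · subst h; exact hk
      · exact hall p h
    simp only [ubaci_crtice, ubaci_crtice_alt, foldl_emit _ _ hpos, ubaciBody_eq,
      last_eq x t]
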